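-- pv_equiv track=rewrite | github.com/shizuoka-yy-lab-armkn/FIELDS-public | backend/fields/domain/records/usecase.py | mark_wrong_order_by_greedy
-- ===== SOURCE A (Python) =====
-- from collections import defaultdict
-- from typing import Generic, Literal, NamedTuple, Sequence, TypeVar
--
-- SegmentMatchType = Literal["ok", "missing", "wrong"]
--
-- def mark_wrong_order_by_greedy(
--     procs: Sequence[int],
--     correct_first_proc: int,
--     correct_last_proc: int,
-- ) -> list[SegmentMatchType]:
--     """貪欲法 (greedy) により工程順序間違いのマーキングをする。
--     戻り値の list の長さは len(src) に等しい。
--     """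
--     pos: dict[int, list[int]] = defaultdict(list)
--
--     for i, proc in reversed(list(enumerate(procs))):
--         pos[proc].append(i)
--
--     res: list[SegmentMatchType] = ["wrong" for _ in procs]
--
--     i = 0
--     next_proc = correct_first_proc
--
--     while next_proc <= correct_last_proc:
--         stack = pos[next_proc]
--         while len(stack) and stack[-1] < i:
--             stack.pop()
--
--         if len(stack) == 0:
--             next_proc += 1
--             continue
--
--         i = stack.pop()
--         res[i] = "ok"
--         next_proc += 1
--
--     return res
-- ===== SOURCE B (Python) =====
-- def mark_wrong_order_by_greedy(procs, correct_first_proc, correct_last_proc):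
--     """Same greedy marking, but without the occurrence-index stacks:
--     walk the distinct values in ascending order and scan procs forward
--     from a moving pointer for each value's earliest usable occurrence."""
--     res = ["wrong"] * len(procs)
--     p = 0
--     for e in sorted(set(procs)):
--         if e < correct_first_proc or e > correct_last_proc:
--             continue
--         for j in range(p, len(procs)):
--             if procs[j] == e:
--                 res[j] = "ok"
--                 p = j + 1
--                 break
--     return res
-- ===== Notes on version B (the rewrite author's own statement) =====
-- stated objective: simpler
-- what changed: B drops A's prebuilt value->occurrence-index stack dictionary and its pop-until-stale while loops, and instead walks the distinct values in ascending sorted order, scanning the list forward from a moving pointer for each value's earliest usable occurrence.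
import Mathlib
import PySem

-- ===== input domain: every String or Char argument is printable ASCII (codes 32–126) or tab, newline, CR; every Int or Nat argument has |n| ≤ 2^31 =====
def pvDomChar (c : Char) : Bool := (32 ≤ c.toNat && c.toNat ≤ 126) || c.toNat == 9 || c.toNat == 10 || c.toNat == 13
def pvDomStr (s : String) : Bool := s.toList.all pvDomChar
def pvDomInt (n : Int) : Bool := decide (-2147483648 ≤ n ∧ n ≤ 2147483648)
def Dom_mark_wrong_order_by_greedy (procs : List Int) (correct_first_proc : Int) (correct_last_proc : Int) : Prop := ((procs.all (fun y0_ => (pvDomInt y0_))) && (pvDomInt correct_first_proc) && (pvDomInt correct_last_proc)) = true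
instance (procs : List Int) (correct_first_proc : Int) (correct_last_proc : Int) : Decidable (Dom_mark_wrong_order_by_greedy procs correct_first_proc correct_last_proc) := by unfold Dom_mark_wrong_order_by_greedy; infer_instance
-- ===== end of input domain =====

-- B replaces A's prebuilt value→occurrence-index stacks with a single sorted pass over the
-- distinct values, scanning the list forward from a moving pointer (objective: simpler).

-- ===== PORT A =====
-- The pos stacks are stored TOP-FIRST: Python appends/reads/pops at the list's END, here
-- the head is the stack top — Python's append i / stack[-1] / stack.pop() become
-- cons / head / tail of the same values in the same order.
def pvBuildPos (procs : List Int) : PySem.Dict Int (List Int) :=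
  ((PySem.List.enumerate procs).reverse).foldl
    (fun d pr => d.insert pr.2 (pr.1 :: d.getD pr.2 [])) PySem.Dict.empty

-- the 'while next_proc <= correct_last_proc' loop: next_proc increases by 1 every
-- iteration, so it runs exactly (correct_last_proc + 1 - next_proc).toNat times
def pvALoop (pos : PySem.Dict Int (List Int)) :
    Nat → Int → Int → List String → List String
  | 0, _, _, res => res
  | n + 1, i, next_proc, res =>
    let stack := (pos.getD next_proc []).dropWhile (fun x => decide (x < i))
    match stack with
    | [] => pvALoop pos n i (next_proc + 1) res
    | j :: _ => pvALoop pos n j (next_proc + 1) (PySem.List.pySetD res j "ok")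

def mark_wrong_order_by_greedy (procs : List Int) (correct_first_proc : Int)
    (correct_last_proc : Int) : List String :=
  pvALoop (pvBuildPos procs) ((correct_last_proc + 1) - correct_first_proc).toNat 0
    correct_first_proc (procs.map fun _ => "wrong")

-- ===== PORT B =====
-- 'for j in range(p, len(procs)): if procs[j] == e: … break'
def pvBFind (procs : List Int) (e : Int) (p : Nat) : Option Nat :=
  if h : p < procs.length then
    if procs[p] = e then some p else pvBFind procs e (p + 1)
  else none
termination_by procs.length - p

def pvBLoop (procs : List Int) (f l : Int) :
    List Int → Nat → List String → List String
  | [], _, res => res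
  | e :: es, p, res =>
    if e < f ∨ l < e then pvBLoop procs f l es p res
    else
      match pvBFind procs e p with
      | some j => pvBLoop procs f l es (j + 1) (PySem.List.pySetD res (j : Int) "ok")
      | none => pvBLoop procs f l es p res

def mark_wrong_order_by_greedy_alt (procs : List Int) (correct_first_proc : Int)
    (correct_last_proc : Int) : List String :=
  pvBLoop procs correct_first_proc correct_last_proc
    (PySem.List.sorted (PySem.Set.ofList procs) (fun x => x) false) 0
    (List.replicate procs.length "wrong")

-- ===== PRECONDITION & SPEC =====
def Spec_mark_wrong_order_by_greedy (procs : List Int) (correct_first_proc : Int) (correct_last_proc : Int) (out : List String) : Prop := out = mark_wrong_order_by_greedy_alt procs correct_first_proc correct_last_proc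
instance (procs : List Int) (correct_first_proc : Int) (correct_last_proc : Int) (out : List String) : Decidable (Spec_mark_wrong_order_by_greedy procs correct_first_proc correct_last_proc out) := by unfold Spec_mark_wrong_order_by_greedy; infer_instance

-- ===== CLAIM (what is proved, stated in full; the proofs are below) =====
def Claim_equal_mark_wrong_order_by_greedy : Prop := ∀ (procs : List Int) (correct_first_proc : Int) (correct_last_proc : Int), Dom_mark_wrong_order_by_greedy procs correct_first_proc correct_last_proc → Spec_mark_wrong_order_by_greedy procs correct_first_proc correct_last_proc (mark_wrong_order_by_greedy procs correct_first_proc correct_last_proc)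

-- ===== LEMMAS AND PROOFS =====

-- the stack A builds for value e, top-first: the indices j with procs[j] = e, ascending
def pvStk (procs : List Int) (e : Int) : List Int :=
  ((PySem.List.enumerate procs).filter (fun pr => pr.2 == e)).map (·.1)

-- common skeleton both loops reduce to: process a list of values, pointer p,
-- match each value to the first index ≥ p carrying it
def pvGo (procs : List Int) : List Int → Int → List String → List String
  | [], _, res => res
  | e :: es, p, res =>
    match ((pvStk procs e).dropWhile (fun x => decide (x < p))).head? with
    | some j => pvGo procs es (j + 1) (PySem.List.pySetD res j "ok")
    | none => pvGo procs es p res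

theorem pvStk_pairwise (procs : List Int) (e : Int) :
    (pvStk procs e).Pairwise (· < ·) := by
  unfold pvStk
  exact List.pairwise_map.mpr ((PySem.List.pairwise_lt_enumerate procs 0).filter _)

theorem mem_pvStk (procs : List Int) (e j : Int) :
    j ∈ pvStk procs e ↔ ∃ (k : Nat) (h : k < procs.length), j = (k : Int) ∧ procs[k] = e := by
  unfold pvStk
  simp only [List.mem_map, List.mem_filter, PySem.List.mem_enumerate_iff]
  constructor
  · rintro ⟨⟨a, b⟩, ⟨⟨k, hk, hp⟩, hb⟩, rfl⟩
    cases hp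
    exact ⟨k, hk, by simp, by simpa using hb⟩
  · rintro ⟨k, hk, rfl, he⟩
    exact ⟨((k : Int), procs[k]), ⟨⟨k, hk, by simp⟩, by simpa using he⟩, rfl⟩

theorem pvStk_eq_nil_of_not_mem (procs : List Int) (e : Int) (he : e ∉ procs) :
    pvStk procs e = [] := by
  unfold pvStk
  rw [List.filter_eq_nil_iff.mpr, List.map_nil]
  rintro ⟨a, b⟩ hm
  rcases (PySem.List.mem_enumerate_iff procs 0 (a, b)).mp hm with ⟨k, hk, hp⟩
  cases hp
  simp only [beq_iff_eq]
  intro hbe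
  exact absurd (hbe ▸ List.getElem_mem hk) he

theorem pvFoldr_getD (e : Int) : ∀ (L : List (Int × Int)),
    ((L.foldr (fun pr d => d.insert pr.2 (pr.1 :: d.getD pr.2 [])) PySem.Dict.empty).getD e [])
      = (L.filter (fun pr => pr.2 == e)).map (·.1)
  | [] => by simp [PySem.Dict.getD_empty]
  | pr :: L => by
    simp only [List.foldr_cons, List.filter_cons]
    rw [PySem.Dict.getD_insert]
    by_cases hc : e = pr.2
    · rw [hc, pvFoldr_getD pr.2 L]; simp
    · simp only [if_neg hc, pvFoldr_getD e L]
      have : (pr.2 == e) = false := by simpa using fun h => hc h.symm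
      simp [this]

theorem pvBuildPos_getD (procs : List Int) (e : Int) :
    (pvBuildPos procs).getD e [] = pvStk procs e := by
  unfold pvBuildPos pvStk
  rw [List.foldl_reverse]
  exact pvFoldr_getD e _

theorem pvDropWhile_lt_succ (xs : List Int) (j : Int) (h : j ∉ xs) :
    xs.dropWhile (fun x => decide (x < j)) = xs.dropWhile (fun x => decide (x < j + 1)) := by
  induction xs with
  | nil => rfl
  | cons x xs ih =>
    simp only [List.dropWhile_cons]
    have hx : x ≠ j := by intro he; exact h (he ▸ List.mem_cons_self ..)
    by_cases hlt : x < j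
    · simp only [decide_eq_true hlt, decide_eq_true (by omega : x < j + 1)]
      exact ih (fun hm => h (List.mem_cons_of_mem _ hm))
    · simp only [decide_eq_false (by omega : ¬ x < j), decide_eq_false (by omega : ¬ x < j + 1)]
      simp

theorem pvHead_dropWhile_of_mem (xs : List Int) (hs : xs.Pairwise (· < ·)) (a : Int)
    (ha : a ∈ xs) : (xs.dropWhile (fun x => decide (x < a))).head? = some a := by
  induction xs with
  | nil => simp at ha
  | cons x xs ih =>
    rcases List.pairwise_cons.mp hs with ⟨hx, hxs⟩
    simp only [List.dropWhile_cons]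
    rcases List.mem_cons.mp ha with rfl | hm
    · simp
    · have : x < a := hx a hm
      simp only [decide_eq_true this]
      exact ih hxs hm

theorem pvBFind_eq_head (procs : List Int) (e : Int) (p : Nat) :
    Option.map (fun j : Nat => (j : Int)) (pvBFind procs e p)
      = ((pvStk procs e).dropWhile (fun x => decide (x < (p : Int)))).head? := by
  rw [pvBFind]
  by_cases h : p < procs.length
  · rw [dif_pos h]
    by_cases he : procs[p] = e
    · rw [if_pos he]
      simp only [Option.map_some]
      rw [pvHead_dropWhile_of_mem _ (pvStk_pairwise procs e) _
        ((mem_pvStk procs e _).mpr ⟨p, h, rfl, he⟩)]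
    · rw [if_neg he]
      have hnm : ((p : Int)) ∉ pvStk procs e := by
        intro hm
        rcases (mem_pvStk procs e _).mp hm with ⟨k, hk, hkp, hke⟩
        have hkpe : k = p := by exact_mod_cast hkp.symm
        exact he (hkpe ▸ hke)
      rw [pvBFind_eq_head procs e (p + 1), pvDropWhile_lt_succ _ ((p : Int)) hnm]
      norm_cast
  · rw [dif_neg h]
    simp only [Option.map_none]
    symm
    rw [List.head?_eq_none_iff, List.dropWhile_eq_nil_iff]
    intro x hx
    rcases (mem_pvStk procs e _).mp hx with ⟨k, hk, hkp, _⟩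
    subst hkp
    simp only [decide_eq_true_eq]
    omega
termination_by procs.length - p

theorem pvALoop_eq_pvGo (procs : List Int) :
    ∀ (n : Nat) (next i p : Int) (res : List String),
      (∀ e, next ≤ e →
        (pvStk procs e).dropWhile (fun x => decide (x < i))
          = (pvStk procs e).dropWhile (fun x => decide (x < p))) →
      pvALoop (pvBuildPos procs) n i next res
        = pvGo procs (PySem.List.pyRange next (next + n) 1) p res := by
  intro n
  induction n with
  | zero =>
    intro next i p res H
    rw [PySem.List.pyRange_one_eq_nil (by push_cast; omega)]
    rfl
  | succ n ih =>
    intro next i p res H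
    rw [PySem.List.pyRange_one_cons (by push_cast; omega), pvALoop]
    simp only [pvBuildPos_getD, pvGo]
    rw [H next le_rfl]
    rcases hd : (pvStk procs next).dropWhile (fun x => decide (x < p)) with _ | ⟨j, t⟩
    · simp only [List.head?_nil]
      have hre : PySem.List.pyRange (next + 1) (next + ((n : Nat) + 1 : Nat)) 1
          = PySem.List.pyRange (next + 1) ((next + 1) + (n : Int)) 1 := by
        congr 1
        push_cast
        ring
      rw [hre]
      exact ih (next + 1) i p res (fun e he => H e (by omega))
    · simp only [List.head?_cons]
      have hjmem : j ∈ pvStk procs next :=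
        (List.dropWhile_sublist _).subset (by rw [hd]; exact List.mem_cons_self ..)
      rcases (mem_pvStk procs next j).mp hjmem with ⟨k, hk, hkj, hke⟩
      have H' : ∀ e, next + 1 ≤ e →
          (pvStk procs e).dropWhile (fun x => decide (x < j))
            = (pvStk procs e).dropWhile (fun x => decide (x < j + 1)) := by
        intro e he
        refine pvDropWhile_lt_succ _ _ (fun hm => ?_)
        rcases (mem_pvStk procs e j).mp hm with ⟨k', hk', hkj', hke'⟩
        have hkk : k = k' := by omega
        subst hkk
        rw [hke] at hke'
        omega
      have hre : PySem.List.pyRange (next + 1) (next + ((n : Nat) + 1 : Nat)) 1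
          = PySem.List.pyRange (next + 1) ((next + 1) + (n : Int)) 1 := by
        congr 1
        push_cast
        ring
      rw [hre]
      exact ih (next + 1) j (j + 1) _ H'

theorem pvGo_filter_mem (procs : List Int) :
    ∀ (L : List Int) (p : Int) (res : List String),
      pvGo procs L p res = pvGo procs (L.filter (fun e => decide (e ∈ procs))) p res := by
  intro L
  induction L with
  | nil => intro p res; rfl
  | cons e es ih =>
    intro p res
    rw [List.filter_cons]
    by_cases he : e ∈ procs
    · rw [if_pos (by simpa using he), pvGo, pvGo]
      cases ((pvStk procs e).dropWhile (fun x => decide (x < p))).head? with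
      | none => exact ih p res
      | some j => exact ih (j + 1) _
    · rw [if_neg (by simpa using he), pvGo, pvStk_eq_nil_of_not_mem procs e he]
      simp only [List.dropWhile_nil, List.head?_nil]
      exact ih p res

theorem pvBLoop_eq_pvGo (procs : List Int) (f l : Int) :
    ∀ (L : List Int) (p : Nat) (res : List String),
      pvBLoop procs f l L p res
        = pvGo procs (L.filter (fun e => decide (¬(e < f ∨ l < e)))) (p : Int) res := by
  intro L
  induction L with
  | nil => intro p res; rfl
  | cons e es ih =>
    intro p res
    rw [pvBLoop, List.filter_cons]
    by_cases hr : e < f ∨ l < e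
    · rw [if_pos hr, if_neg (by simp only [decide_eq_true_eq]; exact fun hc => hc hr)]
      exact ih p res
    · rw [if_neg hr, if_pos (by simp only [decide_eq_true_eq]; exact hr), pvGo]
      have hbf := pvBFind_eq_head procs e p
      cases hb : pvBFind procs e p with
      | none =>
        rw [hb, Option.map_none] at hbf
        rw [← hbf]
        exact ih p res
      | some j =>
        rw [hb, Option.map_some] at hbf
        rw [← hbf]
        show pvBLoop procs f l es (j + 1) (PySem.List.pySetD res (j : Int) "ok")
            = pvGo procs (es.filter (fun e => decide (¬(e < f ∨ l < e)))) ((j : Int) + 1)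
                (PySem.List.pySetD res (j : Int) "ok")
        have hc : ((j : Int) + 1) = ((j + 1 : Nat) : Int) := by push_cast; ring
        rw [hc]
        exact ih (j + 1) _

theorem pvLists_eq (procs : List Int) (f l : Int) :
    (PySem.List.pyRange f (l + 1) 1).filter (fun e => decide (e ∈ procs))
      = (PySem.List.sorted (PySem.Set.ofList procs) (fun x => x) false).filter
          (fun e => decide (¬(e < f ∨ l < e))) := by
  have hL : ((PySem.List.pyRange f (l + 1) 1).filter
      (fun e => decide (e ∈ procs))).Pairwise (· < ·) :=
    (PySem.List.pairwise_lt_pyRange_one f (l + 1)).filter _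
  have hR : ((PySem.List.sorted (PySem.Set.ofList procs) (fun x => x) false).filter
      (fun e => decide (¬(e < f ∨ l < e)))).Pairwise (· < ·) :=
    (PySem.List.sorted_ofList_pairwise_lt procs).filter _
  have hmem : ∀ x, x ∈ (PySem.List.pyRange f (l + 1) 1).filter (fun e => decide (e ∈ procs))
      ↔ x ∈ (PySem.List.sorted (PySem.Set.ofList procs) (fun x => x) false).filter
          (fun e => decide (¬(e < f ∨ l < e))) := by
    intro x
    simp only [List.mem_filter, PySem.List.mem_pyRange_one, PySem.List.mem_sorted,
      PySem.Set.mem_ofList, decide_eq_true_eq]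
    constructor
    · rintro ⟨⟨h1, h2⟩, h3⟩
      exact ⟨h3, by omega⟩
    · rintro ⟨h1, h2⟩
      exact ⟨by omega, h1⟩
  exact List.Perm.eq_of_pairwise
    (fun a b _ _ h1 h2 => absurd h2 (lt_asymm h1)) hL hR
    ((List.perm_ext_iff_of_nodup (hL.nodup) (hR.nodup)).mpr hmem)

-- ===== VERDICT (by name: the statement is the Claim_ definition above) =====
theorem mark_wrong_order_by_greedy_spec : Claim_equal_mark_wrong_order_by_greedy := by
  intro procs f l _
  unfold Spec_mark_wrong_order_by_greedy
  unfold mark_wrong_order_by_greedy mark_wrong_order_by_greedy_alt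
  rw [pvALoop_eq_pvGo procs _ f 0 0 _ (fun _ _ => rfl)]
  rw [pvBLoop_eq_pvGo]
  have hrange : PySem.List.pyRange f (f + ((l + 1) - f).toNat) 1
      = PySem.List.pyRange f (l + 1) 1 := by
    by_cases h : f ≤ l + 1
    · congr 1; omega
    · rw [PySem.List.pyRange_one_eq_nil (by omega), PySem.List.pyRange_one_eq_nil (by omega)]
  rw [hrange, pvGo_filter_mem, pvLists_eq procs f l, List.map_const']
  norm_num
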